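-- pv_equiv track=rewrite | github.com/marcello-py/monkey_pox_2025 | beecrowd/inciante/criptografia.py | deslocar_menor
-- ===== SOURCE A (Python) =====
-- def deslocar_menor(palavra):
--     nova_palavra = ''
--     meio = len(palavra) // 2
--     for i, letra in enumerate(palavra):
--         if i >= meio:
--             nova_letra = chr(ord(letra) - 1)
--         else:
--             nova_letra = letra
--         nova_palavra += nova_letra
--     return nova_palavra
-- ===== SOURCE B (Python) =====
-- def deslocar_menor(palavra):
--     meio = len(palavra) // 2
--     return palavra[:meio] + ''.join(chr(ord(c) - 1) for c in palavra[meio:])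
-- ===== Notes on version B (the rewrite author's own statement) =====
-- stated objective: simpler
-- what changed: Replaces the indexed single pass with an i >= meio guard and repeated string += by a structural split: the first half slice is kept unchanged and chr(ord(c)-1) is mapped over the tail slice with a single join.
import Mathlib
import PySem

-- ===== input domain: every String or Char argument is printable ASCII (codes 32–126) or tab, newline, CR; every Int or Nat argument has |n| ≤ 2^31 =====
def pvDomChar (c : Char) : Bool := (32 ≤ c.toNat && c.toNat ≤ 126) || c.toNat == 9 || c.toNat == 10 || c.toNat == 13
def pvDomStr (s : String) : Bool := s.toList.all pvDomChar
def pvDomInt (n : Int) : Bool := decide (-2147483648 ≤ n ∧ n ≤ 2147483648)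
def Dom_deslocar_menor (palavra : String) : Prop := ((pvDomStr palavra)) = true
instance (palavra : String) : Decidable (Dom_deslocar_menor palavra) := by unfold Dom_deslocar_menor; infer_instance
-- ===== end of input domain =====

-- B splits the string at the midpoint and maps chr(ord(c)-1) over the tail slice instead of A's indexed guarded pass (objective: simpler).

-- ===== PORT A =====
-- literal port of A: enumerate, test i >= meio, append one character at a time
def deslocar_menor (palavra : String) : String :=
  let meio : Int := PySem.Int.floordiv (palavra.toList.length : Int) 2
  String.ofList ((PySem.List.enumerate palavra.toList).foldl
    (fun acc p => acc ++ [if p.1 ≥ meio then Char.ofNat (p.2.toNat - 1) else p.2]) [])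

-- ===== PORT B =====
def deslocar_menor_alt (palavra : String) : String :=
  let l := palavra.toList
  let meio := l.length / 2
  String.ofList (l.take meio) ++ String.ofList ((l.drop meio).map (fun c => Char.ofNat (c.toNat - 1)))

-- ===== PRECONDITION & SPEC =====
def Spec_deslocar_menor (palavra : String) (out : String) : Prop := out = deslocar_menor_alt palavra
instance (palavra : String) (out : String) : Decidable (Spec_deslocar_menor palavra out) := by unfold Spec_deslocar_menor; infer_instance

-- ===== CLAIM (what is proved, stated in full; the proofs are below) =====
def Claim_equal_deslocar_menor : Prop := ∀ (palavra : String), Dom_deslocar_menor palavra → Spec_deslocar_menor palavra (deslocar_menor palavra)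

-- ===== LEMMAS AND PROOFS =====

lemma mapEnum_split (f : Char → Char) (l : List Char) (m : Nat) :
    (PySem.List.enumerate l).map (fun p => if p.1 ≥ (m : Int) then f p.2 else p.2)
      = l.take m ++ (l.drop m).map f := by
  apply List.ext_getElem
  · simp [PySem.List.length_enumerate]; omega
  · intro k h1 h2
    have hk' : k < l.length := by
      simpa [PySem.List.length_enumerate] using h1
    rw [List.getElem_map, PySem.List.getElem_enumerate]
    by_cases hk : k < m
    · rw [List.getElem_append_left (by simpa using by omega : k < (l.take m).length)]
      rw [List.getElem_take, if_neg (by push_cast; omega)]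
    · rw [List.getElem_append_right (by simpa using by omega : (l.take m).length ≤ k)]
      rw [if_pos (by push_cast; omega)]
      simp only [List.getElem_map, List.getElem_drop, List.length_take]
      congr 2
      omega

lemma string_ofList_append (a b : List Char) :
    String.ofList a ++ String.ofList b = String.ofList (a ++ b) := by simp

-- ===== VERDICT (by name: the statement is the Claim_ definition above) =====
theorem deslocar_menor_spec : Claim_equal_deslocar_menor := by
  intro palavra _
  unfold Spec_deslocar_menor deslocar_menor deslocar_menor_alt
  simp only []
  rw [PySem.List.foldl_append_singleton_eq_map, List.nil_append, string_ofList_append]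
  congr 1
  have hm : PySem.Int.floordiv ((palavra.toList.length : Nat) : Int) 2
      = ((palavra.toList.length / 2 : Nat) : Int) := by
    exact_mod_cast PySem.Int.floordiv_natCast palavra.toList.length 2
  rw [hm]
  exact mapEnum_split (fun c => Char.ofNat (c.toNat - 1)) palavra.toList (palavra.toList.length / 2)
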